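-- pv_equiv track=rewrite | github.com/queelius/computational-explorations | src/hypergraph_attacks.py | find_cycle_copies
-- ===== SOURCE A (Python) =====
-- from itertools import combinations, permutations, product
-- from typing import Dict, FrozenSet, List, Optional, Set, Tuple
--
-- def find_cycle_copies(n: int, length: int) -> List[List[Tuple[int, int]]]:
--     """
--     Find all copies of C_{length} in K_n.
--
--     A cycle on length vertices v_0,...,v_{length-1} has edges
--     (v_i, v_{i+1 mod length}).  We enumerate labeled cycles and then
--     deduplicate by choosing a canonical representative (smallest vertex
--     first, second vertex < last vertex).
--     """
--     if length < 3:
--         return []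
--
--     vertices = list(range(n))
--     seen = set()
--     copies = []
--
--     for path_verts in combinations(vertices, length):
--         # Try all cyclic orderings of these vertices.
--         verts = list(path_verts)
--         # Fix vertex 0 as the smallest to reduce redundancy.
--         # Enumerate permutations of the rest.
--         rest = verts[1:]
--         for perm in permutations(rest):
--             cycle = (verts[0],) + perm
--             # Canonical form: start at min vertex; if two rotations share
--             # the min, pick the one where the next vertex is smaller.
--             min_v = min(cycle)
--             min_idx = cycle.index(min_v)
--             rotated = cycle[min_idx:] + cycle[:min_idx]
--             # Break reflection: ensure rotated[1] < rotated[-1].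
--             if rotated[1] > rotated[-1]:
--                 rotated = (rotated[0],) + tuple(reversed(rotated[1:]))
--
--             if rotated in seen:
--                 continue
--             seen.add(rotated)
--
--             edges = []
--             for i in range(length):
--                 u, v = rotated[i], rotated[(i + 1) % length]
--                 edges.append((min(u, v), max(u, v)))
--             copies.append(edges)
--
--     return copies
-- ===== SOURCE B (Python) =====
-- from itertools import combinations, permutations
--
--
-- def find_cycle_copies(n: int, length: int):
--     # Same enumeration order as the canonical-form version, but dedup-free:
--     # verts[0] is the minimum of the combination, so a cycle written as
--     # (verts[0],) + perm is already rotation-canonical; keeping only the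
--     # perms with perm[0] < perm[-1] picks exactly one of the two reflections.
--     if length < 3:
--         return []
--     copies = []
--     for verts in combinations(range(n), length):
--         v0 = verts[0]
--         for perm in permutations(verts[1:]):
--             if perm[0] > perm[-1]:
--                 continue
--             cycle = (v0,) + perm
--             copies.append([(min(cycle[i], cycle[(i + 1) % length]),
--                             max(cycle[i], cycle[(i + 1) % length]))
--                            for i in range(length)])
--     return copies
-- ===== Notes on version B (the rewrite author's own statement) =====
-- stated objective: simpler
-- what changed: B drops A's whole canonicalization machinery (the seen-set, min/index, rotation and reflection-reversal): since each combination is emitted sorted, its first vertex is already the minimum, so B just keeps the permutations with perm[0] < perm[-1] (one reflection representative) and emits their edge lists directly, with no deduplication state at all.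
import Mathlib
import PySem

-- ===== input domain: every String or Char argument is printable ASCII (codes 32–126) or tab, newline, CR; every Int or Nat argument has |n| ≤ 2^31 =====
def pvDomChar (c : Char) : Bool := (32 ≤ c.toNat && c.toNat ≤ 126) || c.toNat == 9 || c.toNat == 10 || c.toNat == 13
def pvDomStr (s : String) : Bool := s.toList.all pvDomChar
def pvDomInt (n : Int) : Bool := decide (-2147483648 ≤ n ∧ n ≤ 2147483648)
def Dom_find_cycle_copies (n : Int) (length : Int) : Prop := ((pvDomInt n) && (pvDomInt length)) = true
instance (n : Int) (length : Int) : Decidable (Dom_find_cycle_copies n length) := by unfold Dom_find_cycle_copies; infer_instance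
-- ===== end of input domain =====

-- B drops A's canonicalization machinery (seen-set, min/index, rotation, reflection reversal):
-- each combination is emitted sorted, so verts[0] is its minimum and keeping only the
-- permutations with perm[0] < perm[-1] picks exactly one reflection representative directly.

-- ===== PORT A =====
-- itertools.combinations(pool, r): CPython returns an empty iterator at once when r > len(pool);
-- this guard only reproduces that short-circuit (combinations_eq_nil_of_length_lt: same value)
def combinationsPy (xs : List Int) (r : Nat) : List (List Int) :=
  if xs.length < r then [] else PySem.List.combinations xs r

-- inner loop body of A: one permutation of verts[1:] (canonicalize, dedup via seen, emit edges)
def stepA (length : Int) (verts : List Int)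
    (st : PySem.Set (List Int) × List (List (Int × Int))) (perm : List Int) :
    PySem.Set (List Int) × List (List (Int × Int)) :=
  let cycle := PySem.List.pyGetD verts 0 0 :: perm
  let min_v := (PySem.List.min? cycle (fun x => x)).getD 0
  let min_idx := (PySem.List.index? cycle min_v).getD 0
  let rotated := cycle.drop min_idx ++ cycle.take min_idx
  let rotated :=
    if PySem.List.pyGetD rotated 1 0 > PySem.List.pyGetD rotated (-1) 0 then
      PySem.List.pyGetD rotated 0 0 :: (rotated.drop 1).reverse
    else rotated
  if rotated ∈ st.1 then st
  else
    (PySem.Set.add st.1 rotated,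
     st.2 ++ [(PySem.List.pyRange 0 length 1).foldl (fun es i =>
        let u := PySem.List.pyGetD rotated i 0
        let v := PySem.List.pyGetD rotated (PySem.Int.mod (i + 1) length) 0
        es ++ [(min u v, max u v)]) []])

-- outer loop body of A: one combination (iterate over all permutations of verts[1:])
def combStepA (length : Int)
    (st : PySem.Set (List Int) × List (List (Int × Int))) (verts : List Int) :
    PySem.Set (List Int) × List (List (Int × Int)) :=
  let rest := verts.drop 1
  (PySem.List.permutations rest rest.length).foldl (stepA length verts) st

def find_cycle_copies (n : Int) (length : Int) : List (List (Int × Int)) :=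
  if length < 3 then []
  else
    let vertices := PySem.List.pyRange 0 n 1
    ((combinationsPy vertices length.toNat).foldl (combStepA length)
      (PySem.Set.empty, [])).2

-- ===== PORT B =====
-- inner loop body of B: skip unless perm[0] < perm[-1], else emit the edge list directly
def stepB (length : Int) (v0 : Int)
    (copies : List (List (Int × Int))) (perm : List Int) : List (List (Int × Int)) :=
  if PySem.List.pyGetD perm 0 0 > PySem.List.pyGetD perm (-1) 0 then copies
  else
    let cycle := v0 :: perm
    copies ++ [(PySem.List.pyRange 0 length 1).map (fun i =>
      (min (PySem.List.pyGetD cycle i 0) (PySem.List.pyGetD cycle (PySem.Int.mod (i + 1) length) 0),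
       max (PySem.List.pyGetD cycle i 0) (PySem.List.pyGetD cycle (PySem.Int.mod (i + 1) length) 0)))]

-- outer loop body of B
def combStepB (length : Int)
    (copies : List (List (Int × Int))) (verts : List Int) : List (List (Int × Int)) :=
  let rest := verts.drop 1
  (PySem.List.permutations rest rest.length).foldl
    (stepB length (PySem.List.pyGetD verts 0 0)) copies

def find_cycle_copies_alt (n : Int) (length : Int) : List (List (Int × Int)) :=
  if length < 3 then []
  else
    (combinationsPy (PySem.List.pyRange 0 n 1) length.toNat).foldl
      (combStepB length) []

-- ===== PRECONDITION & SPEC =====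
def Spec_find_cycle_copies (n : Int) (length : Int) (out : List (List (Int × Int))) : Prop := out = find_cycle_copies_alt n length
instance (n : Int) (length : Int) (out : List (List (Int × Int))) : Decidable (Spec_find_cycle_copies n length out) := by unfold Spec_find_cycle_copies; infer_instance

-- ===== CLAIM (what is proved, stated in full; the proofs are below) =====
def Claim_equal_find_cycle_copies : Prop := ∀ (n : Int) (length : Int), Dom_find_cycle_copies n length → Spec_find_cycle_copies n length (find_cycle_copies n length)

-- ===== LEMMAS AND PROOFS =====

-- the reflection-representative test shared by both programs, as a Bool predicate
def keepPerm (q : List Int) : Bool :=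
  !decide (PySem.List.pyGetD q 0 0 > PySem.List.pyGetD q (-1) 0)

-- the edge list of one emitted cycle (B's comprehension)
def edgesOf (length : Int) (cycle : List Int) : List (Int × Int) :=
  (PySem.List.pyRange 0 length 1).map (fun i =>
    (min (PySem.List.pyGetD cycle i 0) (PySem.List.pyGetD cycle (PySem.Int.mod (i + 1) length) 0),
     max (PySem.List.pyGetD cycle i 0) (PySem.List.pyGetD cycle (PySem.Int.mod (i + 1) length) 0)))

-- canonical tuples one combination contributes to A's seen-set
def seenOf (verts : List Int) : List (List Int) :=
  (((PySem.List.permutations (verts.drop 1) (verts.drop 1).length).filter keepPerm).map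
    (PySem.List.pyGetD verts 0 0 :: ·))

-- edge lists one combination contributes to the output
def outOf (length : Int) (verts : List Int) : List (List (Int × Int)) :=
  (((PySem.List.permutations (verts.drop 1) (verts.drop 1).length).filter keepPerm).map
    (fun q => edgesOf length (PySem.List.pyGetD verts 0 0 :: q)))

theorem pyGetD_neg_one (l : List Int) (d : Int) :
    PySem.List.pyGetD l (-1) d = l.getLast?.getD d := by
  cases l with
  | nil => simp [pysem]
  | cons a t => simp [pysem, List.getLast?_eq_getElem?]; rfl

theorem foldl_min_self (x : Int) (t : List Int) (h : ∀ a ∈ t, x ≤ a) :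
    t.foldl min x = x := by
  induction t with
  | nil => rfl
  | cons a t ih => simp_all

theorem perms_succ (xs : List Int) (r : Nat) : PySem.List.permutations xs (r+1) =
    (List.range xs.length).flatMap (fun i =>
      match xs[i]? with
      | none => []
      | some x => (PySem.List.permutations (xs.eraseIdx i) r).map (fun p => x :: p)) := by
  conv_lhs => rw [PySem.List.permutations]
  congr 1
  funext i
  cases xs[i]? <;> rfl

-- completeness of itertools.permutations: every rearrangement occurs
theorem mem_permutations_of_perm :
    ∀ (q xs : List Int), q.Perm xs → q ∈ PySem.List.permutations xs xs.length := by
  intro q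
  induction q with
  | nil =>
    intro xs h
    rw [List.nil_perm] at h
    subst h
    simp [PySem.List.permutations_zero]
  | cons y t ih =>
    intro xs h
    have hy : y ∈ xs := h.mem_iff.mp (by simp)
    have hlen : t.length + 1 = xs.length := by simpa using h.length_eq
    have hi : xs.idxOf y < xs.length := List.idxOf_lt_length_of_mem hy
    rw [← hlen, perms_succ, List.mem_flatMap]
    refine ⟨xs.idxOf y, List.mem_range.mpr hi, ?_⟩
    rw [List.getElem?_idxOf hy]
    have herase : xs.eraseIdx (xs.idxOf y) = xs.erase y :=
      (List.erase_eq_eraseIdx_of_idxOf rfl).symm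
    have h1 : (xs.erase y).Perm t := by simpa using h.symm.erase y
    have hperm : t.Perm (xs.eraseIdx (xs.idxOf y)) := by rw [herase]; exact h1.symm
    have hl : (xs.eraseIdx (xs.idxOf y)).length = t.length := by
      rw [List.length_eraseIdx_of_lt hi]; omega
    have := ih (xs.eraseIdx (xs.idxOf y)) hperm
    rw [hl] at this
    exact List.mem_map_of_mem this

theorem pairwise_flatMap {α β : Type} (R : β → β → Prop) (f : α → List β) (l : List α)
    (h1 : ∀ a ∈ l, List.Pairwise R (f a))
    (h2 : List.Pairwise (fun a b => ∀ x ∈ f a, ∀ y ∈ f b, R x y) l) :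
    List.Pairwise R (l.flatMap f) := by
  induction l with
  | nil => simp
  | cons a l ih =>
    rw [List.flatMap_cons, List.pairwise_append]
    refine ⟨h1 a (by simp), ih (fun b hb => h1 b (by simp [hb])) h2.tail, ?_⟩
    intro x hx y hy
    rw [List.mem_flatMap] at hy
    obtain ⟨b, hb, hyb⟩ := hy
    exact (List.pairwise_cons.mp h2).1 b hb x hx y hyb

-- itertools.permutations of a strictly increasing list is strictly lex-increasing
theorem perms_pairwise_lex :
    ∀ (r : Nat) (xs : List Int), xs.length = r → List.Pairwise (· < ·) xs →
      List.Pairwise (List.Lex (· < ·)) (PySem.List.permutations xs r) := by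
  intro r
  induction r with
  | zero => intro xs _ _; simp [PySem.List.permutations_zero]
  | succ r ih =>
    intro xs hlen hsort
    rw [perms_succ]
    apply pairwise_flatMap
    · intro i hi
      rw [List.mem_range] at hi
      rw [List.getElem?_eq_getElem hi]
      have hsub : (xs.eraseIdx i).Pairwise (· < ·) :=
        List.Pairwise.sublist (List.eraseIdx_sublist xs i) hsort
      have hl : (xs.eraseIdx i).length = r := by
        rw [List.length_eraseIdx_of_lt hi]; omega
      refine List.Pairwise.map _ ?_ (ih _ hl hsub)
      intro a b hab
      exact List.Lex.cons hab
    · apply List.Pairwise.imp_of_mem (R := (· < ·)) ?_ List.pairwise_lt_range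
      intro i j hi hj hij
      rw [List.mem_range] at hi hj
      intro x hx y hy
      rw [List.getElem?_eq_getElem hi] at hx
      rw [List.getElem?_eq_getElem hj] at hy
      simp only [List.mem_map] at hx hy
      obtain ⟨p1, _, rfl⟩ := hx
      obtain ⟨p2, _, rfl⟩ := hy
      exact List.Lex.rel (List.pairwise_iff_getElem.mp hsort i j hi hj hij)

theorem nodup_combinations :
    ∀ (xs : List Int) (r : Nat), xs.Nodup → (PySem.List.combinations xs r).Nodup := by
  intro xs
  induction xs with
  | nil =>
    intro r _
    cases r with
    | zero => simp [PySem.List.combinations_zero]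
    | succ r => simp [PySem.List.combinations_nil_succ]
  | cons x xs ih =>
    intro r hnd
    cases r with
    | zero => simp [PySem.List.combinations_zero]
    | succ r =>
      rw [PySem.List.combinations_cons_succ, List.nodup_append]
      refine ⟨(ih r hnd.of_cons).map (fun a b h => by injection h), ih (r+1) hnd.of_cons, ?_⟩
      intro a ha b hb
      rw [List.mem_map] at ha
      obtain ⟨c, _, rfl⟩ := ha
      intro hab
      subst hab
      have hsub := PySem.List.sublist_of_mem_combinations hb
      have : x ∈ xs := hsub.mem (by simp)
      exact (List.nodup_cons.mp hnd).1 this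

-- two strictly increasing lists that are rearrangements of each other are equal
theorem sorted_eq_of_perm (l1 l2 : List Int) (h : l1.Perm l2)
    (s1 : List.Pairwise (· < ·) l1) (s2 : List.Pairwise (· < ·) l2) : l1 = l2 :=
  h.eq_of_pairwise (fun a b _ _ h1 h2 => by omega) s1 s2

-- B's inner loop: a filtered map, no state
theorem foldl_stepB (length : Int) (v0 : Int) :
    ∀ (L : List (List Int)) (copies : List (List (Int × Int))),
      L.foldl (stepB length v0) copies
        = copies ++ (L.filter keepPerm).map (fun q => edgesOf length (v0 :: q)) := by
  intro L
  induction L with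
  | nil => simp
  | cons q L ih =>
    intro copies
    rw [List.foldl_cons, ih]
    by_cases h : PySem.List.pyGetD q 0 0 > PySem.List.pyGetD q (-1) 0
    · simp [stepB, keepPerm, h]
    · simp [stepB, keepPerm, h, edgesOf]

theorem getLast?_head_form (q0 y : Int) (ts : List Int) :
    (q0 :: (ts ++ [y])).getLast? = some y := by
  rw [show q0 :: (ts ++ [y]) = (q0 :: ts) ++ [y] from rfl, List.getLast?_append]
  simp

theorem combinationsPy_eq (xs : List Int) (r : Nat) :
    combinationsPy xs r = PySem.List.combinations xs r := by
  unfold combinationsPy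
  split
  · exact (PySem.List.combinations_eq_nil_of_length_lt xs (by omega)).symm
  · rfl

theorem set_add_of_not_mem (s : PySem.Set (List Int)) (x : List Int) (h : x ∉ s) :
    PySem.Set.add s x = s ++ [x] := by
  simp [PySem.Set.add, PySem.Set.contains, h]

-- the edge-building loop of A is B's comprehension
theorem foldl_edges (length : Int) (c : List Int) :
    (PySem.List.pyRange 0 length 1).foldl (fun es i =>
        es ++ [(min (PySem.List.pyGetD c i 0) (PySem.List.pyGetD c (PySem.Int.mod (i + 1) length) 0),
                max (PySem.List.pyGetD c i 0) (PySem.List.pyGetD c (PySem.Int.mod (i + 1) length) 0))])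
      ([] : List (Int × Int)) = edgesOf length c := by
  simpa [edgesOf] using
    PySem.List.foldl_append_singleton_eq_map
      (f := fun i => (min (PySem.List.pyGetD c i 0) (PySem.List.pyGetD c (PySem.Int.mod (i + 1) length) 0),
        max (PySem.List.pyGetD c i 0) (PySem.List.pyGetD c (PySem.Int.mod (i + 1) length) 0)))
      (l := PySem.List.pyRange 0 length 1) (acc := [])

theorem stepA_eq (length v0 q0 y : Int) (ts rest : List Int)
    (st : PySem.Set (List Int) × List (List (Int × Int)))
    (hlt : ∀ a ∈ q0 :: (ts ++ [y]), v0 < a) :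
    stepA length (v0 :: rest) st (q0 :: (ts ++ [y]))
      = (if q0 > y then
          (if v0 :: (q0 :: (ts ++ [y])).reverse ∈ st.1 then st
           else (st.1 ++ [v0 :: (q0 :: (ts ++ [y])).reverse],
                 st.2 ++ [edgesOf length (v0 :: (q0 :: (ts ++ [y])).reverse)]))
         else
          (if v0 :: q0 :: (ts ++ [y]) ∈ st.1 then st
           else (st.1 ++ [v0 :: q0 :: (ts ++ [y])],
                 st.2 ++ [edgesOf length (v0 :: q0 :: (ts ++ [y]))]))) := by
  have hmin : (q0 :: (ts ++ [y])).foldl min v0 = v0 :=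
    foldl_min_self v0 _ (fun a ha => le_of_lt (hlt a ha))
  have hv0 : PySem.List.pyGetD (v0 :: rest) 0 0 = v0 := by simp [pysem]
  unfold stepA
  simp only [hv0, PySem.List.min?_id_cons, hmin, Option.getD_some,
    PySem.List.index?_cons_self, List.drop_zero, List.take_zero, List.append_nil]
  have hc1 : PySem.List.pyGetD (v0 :: q0 :: (ts ++ [y])) 1 0 = q0 := by simp [pysem]
  have hcm : PySem.List.pyGetD (v0 :: q0 :: (ts ++ [y])) (-1) 0 = y := by
    rw [pyGetD_neg_one]
    rw [show (v0 :: q0 :: (ts ++ [y])).getLast? = (q0 :: (ts ++ [y])).getLast? by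
      rw [show v0 :: q0 :: (ts ++ [y]) = (v0 :: q0 :: ts) ++ [y] from rfl,
          List.getLast?_append, getLast?_head_form]; simp]
    rw [getLast?_head_form]; rfl
  rw [hc1, hcm]
  by_cases hgt : q0 > y
  · rw [if_pos hgt, if_pos hgt]
    have hrot : PySem.List.pyGetD (v0 :: q0 :: (ts ++ [y])) 0 0
        :: ((v0 :: q0 :: (ts ++ [y])).drop 1).reverse
        = v0 :: (q0 :: (ts ++ [y])).reverse := by simp [pysem]
    rw [hrot]
    by_cases hin : v0 :: (q0 :: (ts ++ [y])).reverse ∈ st.1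
    · rw [if_pos hin, if_pos hin]
    · rw [if_neg hin, if_neg hin, set_add_of_not_mem _ _ hin, foldl_edges]
  · rw [if_neg hgt, if_neg hgt]
    by_cases hin : v0 :: q0 :: (ts ++ [y]) ∈ st.1
    · rw [if_pos hin, if_pos hin]
    · rw [if_neg hin, if_neg hin, set_add_of_not_mem _ _ hin, foldl_edges]

-- A's inner loop over the permutations of rest, characterized
theorem innerA (length : Int) (v0 : Int) (rest : List Int)
    (hsort : List.Pairwise (· < ·) (v0 :: rest)) (h2 : 2 ≤ rest.length) :
    ∀ (L2 L1 seen0 : List (List Int)) (copies0 : List (List (Int × Int))),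
      PySem.List.permutations rest rest.length = L1 ++ L2 →
      (∀ s ∈ seen0, ∀ q ∈ PySem.List.permutations rest rest.length, s ≠ v0 :: q) →
      L2.foldl (stepA length (v0 :: rest))
        (seen0 ++ (L1.filter keepPerm).map (v0 :: ·),
         copies0 ++ (L1.filter keepPerm).map (fun q => edgesOf length (v0 :: q)))
      = (seen0 ++ ((L1 ++ L2).filter keepPerm).map (v0 :: ·),
         copies0 ++ ((L1 ++ L2).filter keepPerm).map (fun q => edgesOf length (v0 :: q))) := by
  have hPlex : List.Pairwise (List.Lex (· < ·)) (PySem.List.permutations rest rest.length) :=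
    perms_pairwise_lex rest.length rest rfl (List.pairwise_cons.mp hsort).2
  intro L2
  induction L2 with
  | nil => intro L1 seen0 copies0 _ _; simp
  | cons q L2' ih =>
    intro L1 seen0 copies0 hsplit hfresh
    -- shape of q
    have hqP : q ∈ PySem.List.permutations rest rest.length := by rw [hsplit]; simp
    have hq : q.Perm rest := PySem.List.perm_of_mem_permutations hqP
    have hqlen : q.length = rest.length := PySem.List.length_of_mem_permutations hqP
    obtain ⟨qs, y, hqc⟩ : ∃ qs y, q = qs ++ [y] := by
      rcases List.eq_nil_or_concat q with h' | ⟨qs, y, h'⟩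
      · rw [h'] at hqlen; simp at hqlen; omega
      · exact ⟨qs, y, by simpa using h'⟩
    cases qs with
    | nil => rw [hqc] at hqlen; simp at hqlen; omega
    | cons q0 ts =>
    rw [show (q0 :: ts) ++ [y] = q0 :: (ts ++ [y]) from rfl] at hqc
    subst hqc
    have hlt : ∀ a ∈ q0 :: (ts ++ [y]), v0 < a := fun a ha =>
      (List.pairwise_cons.mp hsort).1 a (hq.mem_iff.mp ha)
    have hkeep : keepPerm (q0 :: (ts ++ [y])) = !decide (q0 > y) := by
      unfold keepPerm
      have h1 : PySem.List.pyGetD (q0 :: (ts ++ [y])) 0 0 = q0 := by simp [pysem]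
      have h2 : PySem.List.pyGetD (q0 :: (ts ++ [y])) (-1) 0 = y := by
        rw [pyGetD_neg_one, getLast?_head_form]; rfl
      rw [h1, h2]
    rw [List.foldl_cons, stepA_eq length v0 q0 y ts rest _ hlt]
    have hsplit' : PySem.List.permutations rest rest.length
        = (L1 ++ [q0 :: (ts ++ [y])]) ++ L2' := by rw [hsplit]; simp
    have hPsplit : List.Pairwise (List.Lex (· < ·)) (L1 ++ (q0 :: (ts ++ [y])) :: L2') := by
      rw [← hsplit]; exact hPlex
    have hL1lt : ∀ p ∈ L1, List.Lex (· < ·) p (q0 :: (ts ++ [y])) := by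
      intro p hp
      exact (List.pairwise_append.mp hPsplit).2.2 p hp _ (by simp)
    by_cases hgt : q0 > y
    · -- skipped: its reflection was already emitted and is in the seen set
      rw [if_pos hgt]
      have hrevmem : (q0 :: (ts ++ [y])).reverse ∈ L1 := by
        have hrP : (q0 :: (ts ++ [y])).reverse ∈ PySem.List.permutations rest rest.length :=
          mem_permutations_of_perm _ _ ((List.reverse_perm _).trans hq)
        rw [hsplit] at hrP
        rcases List.mem_append.mp hrP with h' | h'
        · exact h'
        · exfalso
          have hrev : (q0 :: (ts ++ [y])).reverse = y :: (ts.reverse ++ [q0]) := by simp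
          rcases List.mem_cons.mp h' with h'' | h''
          · rw [hrev] at h''
            injection h'' with ha _
            omega
          · have hPc := (List.pairwise_append.mp hPsplit).2.1
            rw [List.pairwise_cons] at hPc
            have hlex : List.Lex (· < ·) (q0 :: (ts ++ [y])) ((q0 :: (ts ++ [y])).reverse) :=
              hPc.1 _ h''
            rw [hrev] at hlex
            cases hlex with
            | cons h => omega
            | rel h => omega
      have hkeeprev : keepPerm ((q0 :: (ts ++ [y])).reverse) = true := by
        have hrev : (q0 :: (ts ++ [y])).reverse = y :: (ts.reverse ++ [q0]) := by simp
        unfold keepPerm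
        rw [hrev]
        have h1 : PySem.List.pyGetD (y :: (ts.reverse ++ [q0])) 0 0 = y := by simp [pysem]
        have h2 : PySem.List.pyGetD (y :: (ts.reverse ++ [q0])) (-1) 0 = q0 := by
          rw [pyGetD_neg_one, getLast?_head_form]; rfl
        rw [h1, h2]
        simp
        omega
      have hin : v0 :: (q0 :: (ts ++ [y])).reverse
          ∈ seen0 ++ (L1.filter keepPerm).map (v0 :: ·) := by
        refine List.mem_append_right _ ?_
        exact List.mem_map_of_mem (List.mem_filter.mpr ⟨hrevmem, hkeeprev⟩)
      rw [if_pos hin]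
      have hkeepq : keepPerm (q0 :: (ts ++ [y])) = false := by
        rw [hkeep]; simp; omega
      simpa [hkeepq] using ih (L1 ++ [q0 :: (ts ++ [y])]) seen0 copies0 hsplit' hfresh
    · -- kept: brand new canonical tuple, emitted
      rw [if_neg hgt]
      have hnotin : v0 :: q0 :: (ts ++ [y]) ∉ seen0 ++ (L1.filter keepPerm).map (v0 :: ·) := by
        intro hmem
        rcases List.mem_append.mp hmem with h' | h'
        · exact hfresh _ h' _ hqP rfl
        · rw [List.mem_map] at h'
          obtain ⟨p, hp, hpe⟩ := h'
          injection hpe with _ hpe2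
          subst hpe2
          have := hL1lt _ (List.mem_of_mem_filter hp)
          exact List.lex_irrefl (fun a (h1 : a < a) => absurd h1 (by omega)) _ this
      rw [if_neg hnotin]
      have hkeepq : keepPerm (q0 :: (ts ++ [y])) = true := by
        rw [hkeep]; simp; omega
      simpa [hkeepq] using ih (L1 ++ [q0 :: (ts ++ [y])]) seen0 copies0 hsplit' hfresh
    

-- A's outer loop over the combinations, characterized
theorem outerA (length : Int) (h3 : 3 ≤ length) (vs : List Int)
    (hvs : List.Pairwise (· < ·) vs) :
    ∀ (L2 L1 : List (List Int)),
      PySem.List.combinations vs length.toNat = L1 ++ L2 →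
      L2.foldl (combStepA length) (L1.flatMap seenOf, L1.flatMap (outOf length))
        = ((L1 ++ L2).flatMap seenOf, (L1 ++ L2).flatMap (outOf length)) := by
  have hndvs : vs.Nodup := hvs.imp (fun h => ne_of_lt h)
  have hndC : (PySem.List.combinations vs length.toNat).Nodup :=
    nodup_combinations vs length.toNat hndvs
  have hshape : ∀ verts ∈ PySem.List.combinations vs length.toNat,
      verts.Sublist vs ∧ verts.length = length.toNat ∧ List.Pairwise (· < ·) verts := by
    intro verts hm
    have hsub := PySem.List.sublist_of_mem_combinations hm
    exact ⟨hsub, PySem.List.length_of_mem_combinations hm, List.Pairwise.sublist hsub hvs⟩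
  intro L2
  induction L2 with
  | nil => intro L1 _; simp
  | cons verts L2' ih =>
    intro L1 hsplit
    have hmem : verts ∈ PySem.List.combinations vs length.toNat := by rw [hsplit]; simp
    obtain ⟨hsub, hlen, hsort⟩ := hshape verts hmem
    cases verts with
    | nil => simp at hlen; omega
    | cons v0 rest =>
    have h2 : 2 ≤ rest.length := by simp at hlen; omega
    have hfresh : ∀ s ∈ L1.flatMap seenOf,
        ∀ q ∈ PySem.List.permutations rest rest.length, s ≠ v0 :: q := by
      intro s hs q hqP heq
      rw [List.mem_flatMap] at hs
      obtain ⟨verts', hv', hsv⟩ := hs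
      have hmem' : verts' ∈ PySem.List.combinations vs length.toNat := by
        rw [hsplit]; exact List.mem_append_left _ hv'
      obtain ⟨hsub', hlen', hsort'⟩ := hshape verts' hmem'
      cases verts' with
      | nil => simp at hlen'; omega
      | cons v0' rest' =>
      unfold seenOf at hsv
      rw [List.mem_map] at hsv
      obtain ⟨q', hq', rfl⟩ := hsv
      have hq'P : q'.Perm rest' := by
        have := List.mem_of_mem_filter hq'
        simpa using PySem.List.perm_of_mem_permutations (by simpa using this)
      have hqp : q.Perm rest := PySem.List.perm_of_mem_permutations hqP
      have hv0' : PySem.List.pyGetD (v0' :: rest') 0 0 = v0' := by simp [pysem]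
      rw [hv0'] at heq
      injection heq with he1 he2
      rw [he1] at hsort' hv'
      have hperm : (v0 :: rest').Perm (v0 :: rest) := by
        have p1 : (v0' :: rest').Perm (v0' :: q') := (hq'P.symm.cons v0')
        rw [he1, he2] at p1
        exact p1.trans (hqp.cons v0)
      have : (v0 :: rest') = (v0 :: rest) := sorted_eq_of_perm _ _ hperm hsort' hsort
      have hne : (v0 :: rest') ≠ (v0 :: rest) := by
        rw [hsplit] at hndC
        have hdisj := (List.nodup_append.mp hndC).2.2
        exact hdisj _ hv' _ (by simp)
      exact hne this
    have hinner := innerA length v0 rest hsort h2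
      (PySem.List.permutations rest rest.length) [] (L1.flatMap seenOf)
      (L1.flatMap (outOf length)) (by simp) hfresh
    simp only [List.filter_nil, List.map_nil, List.append_nil, List.nil_append] at hinner
    rw [List.foldl_cons]
    have hcomb : combStepA length (L1.flatMap seenOf, L1.flatMap (outOf length)) (v0 :: rest)
        = ((L1 ++ [v0 :: rest]).flatMap seenOf, (L1 ++ [v0 :: rest]).flatMap (outOf length)) := by
      unfold combStepA
      simp only [List.drop_one, List.tail_cons]
      rw [hinner]
      have hv0 : PySem.List.pyGetD (v0 :: rest) 0 0 = v0 := by simp [pysem]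
      rw [List.flatMap_append, List.flatMap_append]
      unfold seenOf outOf
      simp [hv0]
    rw [hcomb]
    have hsplit' : PySem.List.combinations vs length.toNat
        = (L1 ++ [v0 :: rest]) ++ L2' := by rw [hsplit]; simp
    rw [ih (L1 ++ [v0 :: rest]) hsplit']
    simp

-- ===== VERDICT (by name: the statement is the Claim_ definition above) =====
theorem find_cycle_copies_spec : Claim_equal_find_cycle_copies := by
  intro n length _
  unfold Spec_find_cycle_copies find_cycle_copies find_cycle_copies_alt
  by_cases h : length < 3
  · simp [h]
  · simp only [if_neg h, combinationsPy_eq]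
    have h3 : 3 ≤ length := by omega
    have hvs : List.Pairwise (· < ·) (PySem.List.pyRange 0 n 1) :=
      PySem.List.pairwise_lt_pyRange_one 0 n
    have := outerA length h3 (PySem.List.pyRange 0 n 1) hvs
      (PySem.List.combinations (PySem.List.pyRange 0 n 1) length.toNat) [] rfl
    simp only [List.flatMap_nil, List.nil_append] at this
    rw [show (PySem.Set.empty : PySem.Set (List Int)) = [] from rfl]
    rw [this]
    -- B side
    have hb : ∀ (L : List (List Int)) (copies : List (List (Int × Int))),
        L.foldl (combStepB length) copies = copies ++ L.flatMap (outOf length) := by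
      intro L
      induction L with
      | nil => simp
      | cons verts L ih =>
        intro copies
        rw [List.foldl_cons, combStepB, foldl_stepB, ih]
        simp [outOf]
    rw [hb]
    simp
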